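-- pv_equiv track=rewrite | github.com/Syyan7979/Kattis-Solutions-python- | Python Kattis/Kattis33(trik).py | trik
-- ===== SOURCE A (Python) =====
-- def trik(string):
-- 	cups = ["A", "B", "C"]
-- 	for i in string:
-- 		if i == "A":
-- 			cups[0], cups[1] = cups[1], cups[0]
-- 		elif i == "B":
-- 			cups[1], cups[2] = cups[2], cups[1]
-- 		elif i == "C":
-- 			cups[0], cups[2] = cups[2], cups[0]
-- 	if string[0] == "A" or string[0] == "C":
-- 		return cups.index("A") + 1
-- 	else:
-- 		return cups.index("B") + 1
-- ===== SOURCE B (Python) =====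
-- def trik(string):
--     # Track a single integer position instead of a list of labels.
--     target_first = string[0]  # read up front (IndexError on empty, like A)
--     pos = 0 if target_first in ("A", "C") else 1
--     for i in string:
--         if i == "A":
--             pos = {0: 1, 1: 0}.get(pos, pos)
--         elif i == "B":
--             pos = {1: 2, 2: 1}.get(pos, pos)
--         elif i == "C":
--             pos = {0: 2, 2: 0}.get(pos, pos)
--     return pos + 1
-- ===== Notes on version B (the rewrite author's own statement) =====
-- stated objective: simpler
-- what changed: B tracks a single integer position of the watched cup under each transposition instead of maintaining a three-element label list and searching it with list.index at the end.
import Mathlib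
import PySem

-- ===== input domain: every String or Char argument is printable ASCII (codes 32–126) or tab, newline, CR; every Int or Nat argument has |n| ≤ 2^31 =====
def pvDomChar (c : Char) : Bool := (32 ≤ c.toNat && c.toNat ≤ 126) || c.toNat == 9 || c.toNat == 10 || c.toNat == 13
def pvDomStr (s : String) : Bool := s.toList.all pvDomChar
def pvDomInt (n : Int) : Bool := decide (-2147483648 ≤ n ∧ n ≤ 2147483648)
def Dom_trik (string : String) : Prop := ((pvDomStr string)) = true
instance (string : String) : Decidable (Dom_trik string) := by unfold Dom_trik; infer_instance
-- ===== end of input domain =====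

-- B replaces A's three-element label list and the final list.index scan by a single
-- integer position of the watched cup, updated per transposition (objective: simpler).

-- ===== PORT A =====
-- the cups list of A, represented as a triple of its three labels
def trikSwap (i : Char) : String × String × String → String × String × String
  | (c0, c1, c2) =>
    if i = 'A' then (c1, c0, c2)
    else if i = 'B' then (c0, c2, c1)
    else if i = 'C' then (c2, c1, c0)
    else (c0, c1, c2)

def trikLoop : List Char → String × String × String → String × String × String
  | [], cups => cups
  | i :: rest, cups => trikLoop rest (trikSwap i cups)

-- cups.index t  (t is always present, as in the Python)
def cupsIndex (cups : String × String × String) (t : String) : Int :=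
  if cups.1 = t then 0 else if cups.2.1 = t then 1 else 2

def trik (string : String) : Int :=
  let cups := trikLoop string.toList ("A", "B", "C")
  match PySem.Str.pyGet? string 0 with
  | none => 0   -- string[0] raises IndexError in Python: excluded by Pre_trik
  | some c0 =>
    if c0 = 'A' ∨ c0 = 'C' then cupsIndex cups "A" + 1 else cupsIndex cups "B" + 1

-- ===== PORT B =====
def trikStep (pos : Int) (i : Char) : Int :=
  if i = 'A' then (if pos = 0 then 1 else if pos = 1 then 0 else pos)
  else if i = 'B' then (if pos = 1 then 2 else if pos = 2 then 1 else pos)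
  else if i = 'C' then (if pos = 0 then 2 else if pos = 2 then 0 else pos)
  else pos

def trik_alt (string : String) : Int :=
  match PySem.Str.pyGet? string 0 with
  | none => 0   -- string[0] raises IndexError in Python: excluded by Pre_trik
  | some c0 =>
    let pos0 : Int := if c0 = 'A' ∨ c0 = 'C' then 0 else 1
    string.toList.foldl trikStep pos0 + 1

-- ===== PRECONDITION & SPEC =====
-- A evaluates string[0], which raises IndexError on the empty string.
def Pre_trik (string : String) : Prop := string ≠ ""
instance (string : String) : Decidable (Pre_trik string) := by unfold Pre_trik; infer_instance
def pvWitness_trik : String := "AB"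
def Spec_trik (string : String) (out : Int) : Prop := out = trik_alt string
instance (string : String) (out : Int) : Decidable (Spec_trik string out) := by unfold Spec_trik; infer_instance

-- ===== CLAIM (what is proved, stated in full; the proofs are below) =====
def Claim_equal_trik : Prop := ∀ (string : String), Dom_trik string → Pre_trik string → Spec_trik string (trik string)

-- ===== LEMMAS AND PROOFS =====

def perms3 : List (String × String × String) :=
  [("A","B","C"), ("B","A","C"), ("A","C","B"), ("C","B","A"), ("B","C","A"), ("C","A","B")]

lemma trikSwap_step (t : String) (ht : t = "A" ∨ t = "B") (i : Char)
    (cups : String × String × String) (h : cups ∈ perms3) :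
    trikSwap i cups ∈ perms3 ∧
      cupsIndex (trikSwap i cups) t = trikStep (cupsIndex cups t) i := by
  obtain ⟨c0, c1, c2⟩ := cups
  rcases ht with ht | ht <;> subst ht <;>
    simp only [perms3, List.mem_cons, List.not_mem_nil, or_false] at h <;>
    rcases h with h | h | h | h | h | h <;>
    (injection h with h1 h2; injection h2 with h2 h3; subst h1; subst h2; subst h3) <;>
    by_cases hA : i = 'A' <;> by_cases hB : i = 'B' <;> by_cases hC : i = 'C' <;>
    simp_all [trikSwap, trikStep, cupsIndex, perms3]

lemma trik_invariant (t : String) (ht : t = "A" ∨ t = "B") :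
    ∀ (l : List Char) (cups : String × String × String), cups ∈ perms3 →
      trikLoop l cups ∈ perms3 ∧
      cupsIndex (trikLoop l cups) t = List.foldl trikStep (cupsIndex cups t) l := by
  intro l
  induction l with
  | nil => intro cups h; exact ⟨h, rfl⟩
  | cons i rest ih =>
    intro cups h
    obtain ⟨hmem, heq⟩ := trikSwap_step t ht i cups h
    have := ih _ hmem
    exact ⟨this.1, by simpa [trikLoop, heq] using this.2⟩

-- ===== VERDICT (by name: the statement is the Claim_ definition above) =====
theorem trik_spec : Claim_equal_trik := by
  intro string _ hpre
  unfold Spec_trik trik trik_alt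
  cases hget : PySem.Str.pyGet? string 0 with
  | none =>
    exfalso
    apply hpre
    simp [PySem.List.pyGet?, PySem.List.pyIdx?] at hget
    rcases Nat.eq_zero_or_pos string.length with h0 | hp
    · simpa using String.length_eq_zero_iff.mp h0
    · exact hget hp
  | some c0 =>
    have base : cupsIndex ("A","B","C") "A" = 0 := by decide
    have base' : cupsIndex ("A","B","C") "B" = 1 := by decide
    have hmem : (("A","B","C") : String × String × String) ∈ perms3 := by decide
    by_cases hc : c0 = 'A' ∨ c0 = 'C'
    · simp only [if_pos hc]
      have := (trik_invariant "A" (Or.inl rfl) string.toList _ hmem).2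
      rw [this, base]
    · simp only [if_neg hc]
      have := (trik_invariant "B" (Or.inr rfl) string.toList _ hmem).2
      rw [this, base']
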